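-- pv_equiv track=rewrite | github.com/tripleoxygen/v5471 | firmInfo_r2.py | readAsString
-- ===== SOURCE A (Python) =====
-- def readAsString(array, len, ofset=0):
--   out=0
--   for i in range(len):
--     out=out<<8
--     out+=array[ofset+i]
--
--   chars_in_reverse = []
--   while out != 0x0:
--     chars_in_reverse.append(chr(out & 0xFF))
--     out = out >> 8
--
--   chars_in_reverse.reverse()
--   return ''.join(chars_in_reverse)
-- ===== SOURCE B (Python) =====
-- def readAsString(array, len, ofset=0):
--     # big-endian value as one weighted sum, then one bulk bytes conversion
--     out = sum(array[ofset + i] << (8 * (len - 1 - i)) for i in range(len))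
--     n = (out.bit_length() + 7) // 8
--     return out.to_bytes(n, 'big').decode('latin-1')
-- ===== Notes on version B (the rewrite author's own statement) =====
-- stated objective: idiomatic
-- what changed: Replaces the while-extract-append-reverse byte loop with a closed-form byte count plus one bulk big-endian conversion (bit_length/to_bytes/latin-1 decode), and the shift-accumulate loop with a single weighted sum comprehension.
import Mathlib
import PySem

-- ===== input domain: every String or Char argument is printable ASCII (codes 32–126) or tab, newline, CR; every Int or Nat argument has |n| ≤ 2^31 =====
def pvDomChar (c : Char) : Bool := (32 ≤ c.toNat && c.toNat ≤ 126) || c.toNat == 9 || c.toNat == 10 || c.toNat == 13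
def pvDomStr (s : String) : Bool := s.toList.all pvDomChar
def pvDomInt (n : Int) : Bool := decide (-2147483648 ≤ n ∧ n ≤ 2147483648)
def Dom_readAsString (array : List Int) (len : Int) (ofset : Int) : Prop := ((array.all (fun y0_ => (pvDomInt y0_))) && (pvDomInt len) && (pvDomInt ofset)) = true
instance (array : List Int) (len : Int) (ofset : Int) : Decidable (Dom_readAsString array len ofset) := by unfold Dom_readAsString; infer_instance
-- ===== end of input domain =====

-- B replaces A's extract-bytes-and-reverse while-loop by a closed-form byte count and one
-- big-endian bulk conversion (int.to_bytes/latin-1), and phase 1 by a weighted sum; idiomatic.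

-- ===== PORT A =====
-- the while-loop 'while out != 0: append chr(out & 0xFF); out >>= 8', run on out.toNat;
-- exact for out ≥ 0 (Pre_ guarantees it: Python A never exits the loop when out < 0)
def pvChrRevA (m : Nat) : List Char :=
  if h : m = 0 then [] else Char.ofNat (m % 256) :: pvChrRevA (m / 256)
termination_by m
decreasing_by exact Nat.div_lt_self (Nat.pos_of_ne_zero h) (by norm_num)

def readAsString (array : List Int) (len : Int) (ofset : Int) : String :=
  -- out = 0; for i in range(len): out = out<<8; out += array[ofset+i]   (out<<8 = out*256)
  let out : Int := (PySem.List.pyRange 0 len 1).foldl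
    (fun out i => out * 256 + PySem.List.pyGetD array (ofset + i) 0) 0
  String.mk (pvChrRevA out.toNat).reverse

-- ===== PORT B =====
-- out.bit_length() for a nonnegative integer
def pvBitLen (m : Nat) : Nat := if m = 0 then 0 else Nat.log2 m + 1

def readAsString_alt (array : List Int) (len : Int) (ofset : Int) : String :=
  -- out = sum(array[ofset+i] << (8*(len-1-i)) for i in range(len))
  let out : Int := (PySem.List.pyRange 0 len 1).foldl
    (fun s i => s + PySem.List.pyGetD array (ofset + i) 0 * 256 ^ (len - 1 - i).toNat) 0
  -- n = (out.bit_length() + 7) // 8;  out.to_bytes(n,'big') byte i = (out >> 8*(n-1-i)) & 0xFF;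
  -- .decode('latin-1') = chr of each byte (exact for out ≥ 0, guaranteed by Pre_)
  let n := (pvBitLen out.toNat + 7) / 8
  String.mk ((List.range n).map (fun i => Char.ofNat (out.toNat / 256 ^ (n - 1 - i) % 256)))

-- ===== PRECONDITION & SPEC =====
-- Pre_ excludes exactly the inputs where Python A does not return: an out-of-range index
-- (IndexError) and a negative big-endian value Σ array[ofset+i]·256^(len−1−i), on which
-- A's while-loop never terminates (out >> 8 stalls at −1).  B raises there too
-- (IndexError / OverflowError from to_bytes).
def Pre_readAsString (array : List Int) (len : Int) (ofset : Int) : Prop :=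
  (len ≤ 0 ∨ (-(array.length : Int) ≤ ofset ∧ ofset + len ≤ (array.length : Int))) ∧
  0 ≤ (PySem.List.pyRange 0 len 1).foldl
    (fun s i => s + PySem.List.pyGetD array (ofset + i) 0 * 256 ^ (len - 1 - i).toNat) 0
instance (array : List Int) (len : Int) (ofset : Int) : Decidable (Pre_readAsString array len ofset) := by
  unfold Pre_readAsString; infer_instance

def pvWitness_readAsString : List Int × Int × Int := ([72, 105, 0, 33], 3, 1)

def Spec_readAsString (array : List Int) (len : Int) (ofset : Int) (out : String) : Prop := out = readAsString_alt array len ofset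
instance (array : List Int) (len : Int) (ofset : Int) (out : String) : Decidable (Spec_readAsString array len ofset out) := by unfold Spec_readAsString; infer_instance

-- ===== CLAIM (what is proved, stated in full; the proofs are below) =====
def Claim_equal_readAsString : Prop := ∀ (array : List Int) (len : Int) (ofset : Int), Dom_readAsString array len ofset → Pre_readAsString array len ofset → Spec_readAsString array len ofset (readAsString array len ofset)

-- ===== LEMMAS AND PROOFS =====

-- phase 1: the shift-accumulate fold equals the weighted sum, over range(0, n)
theorem pv_fold_eq (v : Int → Int) (n : Nat) (a : Int) :
    (PySem.List.pyRange 0 (n : Int) 1).foldl (fun o i => o * 256 + v i) a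
    = a * 256 ^ n + (PySem.List.pyRange 0 (n : Int) 1).foldl
        (fun s i => s + v i * 256 ^ (((n : Int) - 1 - i).toNat)) 0 := by
  induction n generalizing a with
  | zero => simp [PySem.List.pyRange_one_eq_nil]
  | succ k ih =>
    have hsplit : PySem.List.pyRange 0 ((k : Int) + 1) 1
        = PySem.List.pyRange 0 (k : Int) 1 ++ [(k : Int)] :=
      PySem.List.pyRange_one_succ_right (by positivity)
    push_cast
    rw [hsplit, List.foldl_append, List.foldl_append, ih]
    simp only [List.foldl_cons, List.foldl_nil]
    rw [PySem.List.foldl_add (PySem.List.pyRange 0 (k : Int) 1)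
          (fun i => v i * 256 ^ (((k : Int) + 1 - 1 - i).toNat)) 0,
        PySem.List.foldl_add (PySem.List.pyRange 0 (k : Int) 1)
          (fun i => v i * 256 ^ (((k : Int) - 1 - i).toNat)) 0]
    have hmap : (PySem.List.pyRange 0 (k : Int) 1).map
          (fun i => v i * 256 ^ (((k : Int) + 1 - 1 - i).toNat))
        = (PySem.List.pyRange 0 (k : Int) 1).map
          (fun i => 256 * (v i * 256 ^ (((k : Int) - 1 - i).toNat))) := by
      apply List.map_congr_left
      intro i hi
      rw [PySem.List.mem_pyRange_one] at hi
      have he : ((k : Int) + 1 - 1 - i).toNat = (((k : Int) - 1 - i).toNat) + 1 := by omega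
      rw [he, pow_succ]; ring
    rw [hmap, List.sum_map_mul_left]
    have hk : ((k : Int) + 1 - 1 - (k : Int)).toNat = 0 := by omega
    rw [hk]
    ring

-- bit-length drops by 8 under division by 256
theorem pv_log_div (m : Nat) (h : 256 ≤ m) : Nat.log2 (m / 256) = Nat.log2 m - 8 := by
  have h2 : (1:Nat) < 2 := by norm_num
  simp only [Nat.log2_eq_log_two]
  have : m / 256 = m / 2 / 2 / 2 / 2 / 2 / 2 / 2 / 2 := by omega
  rw [this]
  rw [Nat.log_div_base, Nat.log_div_base, Nat.log_div_base, Nat.log_div_base,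
      Nat.log_div_base, Nat.log_div_base, Nat.log_div_base, Nat.log_div_base]
  omega

theorem pv_nbytes_div (m : Nat) (h : m ≠ 0) :
    (pvBitLen (m / 256) + 7) / 8 + 1 = (pvBitLen m + 7) / 8 := by
  unfold pvBitLen
  by_cases h256 : 256 ≤ m
  · have hd : m / 256 ≠ 0 := by
      intro h0; have := Nat.lt_of_div_eq_zero (by norm_num) h0; omega
    have hl : 8 ≤ Nat.log2 m := by
      have := Nat.log2_self_le (n := 256) (by norm_num)
      have hmono : Nat.log2 256 ≤ Nat.log2 m := by
        simp only [Nat.log2_eq_log_two]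
        exact Nat.log_mono_right h256
      have h256l : Nat.log2 256 = 8 := by decide
      omega
    rw [if_neg h, if_neg hd, pv_log_div m h256]
    omega
  · have hd : m / 256 = 0 := Nat.div_eq_of_lt (by omega)
    have hl : Nat.log2 m < 8 := by
      by_contra hc
      push_neg at hc
      have := Nat.log2_self_le h
      have : 2 ^ 8 ≤ 2 ^ Nat.log2 m := Nat.pow_le_pow_right (by norm_num) hc
      omega
    rw [if_neg h, if_pos hd]
    omega

-- little-endian characterisation of A's while-loop
theorem pv_chrRev_eq_le (m : Nat) :
    pvChrRevA m
    = (List.range ((pvBitLen m + 7) / 8)).map (fun i => Char.ofNat (m / 256 ^ i % 256)) := by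
  induction m using Nat.strong_induction_on with
  | _ m ih =>
    by_cases h : m = 0
    · subst h; rw [pvChrRevA]; simp [pvBitLen]
    · rw [pvChrRevA, dif_neg h,
          ih (m / 256) (Nat.div_lt_self (Nat.pos_of_ne_zero h) (by norm_num))]
      rw [← pv_nbytes_div m h, List.range_succ_eq_map, List.map_cons, List.map_map]
      congr 1
      · simp
      · apply List.map_congr_left
        intro i _
        simp only [Function.comp_apply]
        rw [pow_succ, Nat.div_div_eq_div_mul, Nat.mul_comm]
-- the reversed little-endian list is B's big-endian map
theorem pv_rev_le_eq_be (m : Nat) :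
    ((List.range ((pvBitLen m + 7) / 8)).map (fun i => Char.ofNat (m / 256 ^ i % 256))).reverse
    = (List.range ((pvBitLen m + 7) / 8)).map
        (fun i => Char.ofNat (m / 256 ^ ((pvBitLen m + 7) / 8 - 1 - i) % 256)) := by
  apply List.ext_getElem
  · simp
  · intro i h1 h2
    simp only [List.getElem_reverse, List.getElem_map, List.getElem_range,
      List.length_map, List.length_range] at *

-- ===== VERDICT (by name: the statement is the Claim_ definition above) =====
theorem readAsString_spec : Claim_equal_readAsString := by
  intro array len ofset _ _
  unfold Spec_readAsString readAsString readAsString_alt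
  by_cases hlen : 0 ≤ len
  · have hl : len = ((len.toNat : Nat) : Int) := (Int.toNat_of_nonneg hlen).symm
    rw [hl, pv_fold_eq (fun i => PySem.List.pyGetD array (ofset + i) 0) len.toNat 0]
    simp only [zero_mul, zero_add]
    rw [pv_chrRev_eq_le, pv_rev_le_eq_be]
  · have hnil : PySem.List.pyRange 0 len 1 = [] :=
      PySem.List.pyRange_one_eq_nil (by omega)
    rw [hnil]
    simp [pvChrRevA, pvBitLen]
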